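-- pv_equiv track=rewrite | github.com/Vobludalib/EvoMusic | crossovers.py | alternate_crossover
-- ===== SOURCE A (Python) =====
-- def alternate_crossover(parent1, parent2):
--     offspring1 = []
--     offspring2 = []
--     for i in range(max(len(parent1), len(parent2))):
--         if i % 2 == 0:
--             if i < len(parent1):
--                 offspring1.append(parent1[i])
--             if i < len(parent2):
--                 offspring2.append(parent2[i])
--         else:
--             if i < len(parent2):
--                 offspring1.append(parent2[i])
--             if i < len(parent1):
--                 offspring2.append(parent1[i])
--
--
--
--     return offspring1, offspring2
-- ===== SOURCE B (Python) =====
-- def alternate_crossover(parent1, parent2):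
--     # Offspring 1 = even-indexed elements of parent1 woven with odd-indexed
--     # elements of parent2 (and symmetrically for offspring 2).
--     e1, o1 = parent1[::2], parent1[1::2]
--     e2, o2 = parent2[::2], parent2[1::2]
--
--     def merge(a, b):
--         out = []
--         for x, y in zip(a, b):
--             out += (x, y)
--         n = min(len(a), len(b))
--         return out + a[n:] + b[n:]
--
--     return merge(e1, o2), merge(e2, o1)
-- ===== Notes on version B (the rewrite author's own statement) =====
-- stated objective: alternative
-- what changed: Replaces the single indexed loop with a parity test per iteration by slicing each parent into its even- and odd-indexed halves and zip-merging the two relevant halves per offspring, appending the leftover tail of the longer half.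
import Mathlib
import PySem

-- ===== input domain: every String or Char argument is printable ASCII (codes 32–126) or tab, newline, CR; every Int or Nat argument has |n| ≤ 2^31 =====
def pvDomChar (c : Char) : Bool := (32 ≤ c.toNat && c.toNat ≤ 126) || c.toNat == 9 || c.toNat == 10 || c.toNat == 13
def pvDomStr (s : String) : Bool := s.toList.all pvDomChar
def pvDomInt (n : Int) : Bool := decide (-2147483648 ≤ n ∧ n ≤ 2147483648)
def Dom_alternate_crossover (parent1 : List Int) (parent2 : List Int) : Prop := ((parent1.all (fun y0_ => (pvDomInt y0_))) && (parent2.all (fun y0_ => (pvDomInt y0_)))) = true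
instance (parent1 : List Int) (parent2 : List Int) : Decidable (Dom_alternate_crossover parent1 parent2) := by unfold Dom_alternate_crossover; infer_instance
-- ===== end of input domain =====

-- B replaces A's single indexed loop (parity test per index) by slicing each parent
-- into even-/odd-indexed halves and zip-merging the relevant halves per offspring
-- (objective: alternative decomposition, same cost).

-- ===== PORT A =====
-- one iteration of A's loop; parent[i] is guarded by i < len, so pyGetD is exact there
def acStep (parent1 parent2 : List Int) (st : List Int × List Int) (i : Int) : List Int × List Int :=
  if i % 2 == 0 then
    ((if i < (parent1.length : Int) then st.1 ++ [PySem.List.pyGetD parent1 i 0] else st.1),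
     (if i < (parent2.length : Int) then st.2 ++ [PySem.List.pyGetD parent2 i 0] else st.2))
  else
    ((if i < (parent2.length : Int) then st.1 ++ [PySem.List.pyGetD parent2 i 0] else st.1),
     (if i < (parent1.length : Int) then st.2 ++ [PySem.List.pyGetD parent1 i 0] else st.2))

def alternate_crossover (parent1 : List Int) (parent2 : List Int) : List Int × List Int :=
  (PySem.List.pyRange 0 (max (parent1.length : Int) (parent2.length : Int)) 1).foldl
    (acStep parent1 parent2) ([], [])

-- ===== PORT B =====
-- merge(a, b) of Source B: zip loop, then the leftover tails a[n:] and b[n:]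
def acMerge (a b : List Int) : List Int :=
  let out := (a.zip b).foldl (fun out xy => out ++ [xy.1, xy.2]) []
  let n : Int := (min a.length b.length : Nat)
  out ++ PySem.List.slice a (some n) none ++ PySem.List.slice b (some n) none

def alternate_crossover_alt (parent1 : List Int) (parent2 : List Int) : List Int × List Int :=
  -- parent[::2] / parent[1::2]; step 2 ≠ 0, so slice? never returns none and getD [] is exact
  let e1 := (PySem.List.slice? parent1 none none 2).getD []
  let o1 := (PySem.List.slice? parent1 (some 1) none 2).getD []
  let e2 := (PySem.List.slice? parent2 none none 2).getD []
  let o2 := (PySem.List.slice? parent2 (some 1) none 2).getD []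
  (acMerge e1 o2, acMerge e2 o1)

-- ===== PRECONDITION & SPEC =====
def Spec_alternate_crossover (parent1 : List Int) (parent2 : List Int) (out : List Int × List Int) : Prop := out = alternate_crossover_alt parent1 parent2
instance (parent1 : List Int) (parent2 : List Int) (out : List Int × List Int) : Decidable (Spec_alternate_crossover parent1 parent2 out) := by unfold Spec_alternate_crossover; infer_instance

-- ===== CLAIM (what is proved, stated in full; the proofs are below) =====
def Claim_equal_alternate_crossover : Prop := ∀ (parent1 : List Int) (parent2 : List Int), Dom_alternate_crossover parent1 parent2 → Spec_alternate_crossover parent1 parent2 (alternate_crossover parent1 parent2)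

-- ===== LEMMAS AND PROOFS =====

-- elements of a list at even indices
def evIdx : List Int → List Int
  | [] => []
  | [x] => [x]
  | x :: _ :: t => x :: evIdx t

-- elements of a list at odd indices
def odIdx (l : List Int) : List Int := evIdx l.tail

-- alternate-take merge: one element from a, then the roles swap
def sMerge : List Int → List Int → List Int
  | [], b => b
  | x :: a, b => x :: sMerge b a
termination_by a b => a.length + b.length
decreasing_by simp; omega

theorem sMerge_nil_right : ∀ a : List Int, sMerge a [] = a := by
  intro a; cases a with
  | nil => simp [sMerge]
  | cons x t => simp [sMerge]

-- B's merge is the alternate-take merge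
theorem foldl_pairs : ∀ (l : List (Int × Int)) (acc : List Int),
    l.foldl (fun out xy => out ++ [xy.1, xy.2]) acc = acc ++ l.flatMap (fun xy => [xy.1, xy.2]) := by
  intro l
  induction l with
  | nil => simp
  | cons p t ih => intro acc; simp [List.foldl_cons, ih]

theorem acMerge_eq_sMerge : ∀ a b : List Int, acMerge a b = sMerge a b := by
  intro a
  induction a with
  | nil =>
    intro b
    simp [acMerge, sMerge]
  | cons x a' ih =>
    intro b
    cases b with
    | nil =>
      simp [acMerge, sMerge_nil_right]
    | cons y b' =>
      have h := ih b'
      simp only [acMerge, foldl_pairs, PySem.List.slice_from_natCast] at h ⊢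
      simp only [List.zip_cons_cons, List.flatMap_cons, List.length_cons]
      simp only [sMerge]
      simpa [Nat.succ_min_succ] using h

-- characterisation of the step-2 slices
theorem fm2 : ∀ xs : List Int,
    List.filterMap (fun k => xs[2*k]?) (List.range ((xs.length+1)/2)) = evIdx xs := by
  intro xs
  induction xs using evIdx.induct with
  | case1 => simp [evIdx]
  | case2 x => simp [evIdx]
  | case3 x y t ih =>
    have hlen : ((x :: y :: t).length + 1)/2 = (t.length+1)/2 + 1 := by simp; omega
    rw [hlen, List.range_succ_eq_map, List.filterMap_cons]
    simp only [List.filterMap_map]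
    have hf : (fun k => (x :: y :: t)[2*(k+1)]?) = (fun k => t[2*k]?) := by
      funext k
      have h2 : 2*(k+1) = 2*k+1+1 := by omega
      simp [h2]
    simp only [Function.comp_def, Nat.succ_eq_add_one]
    simp [hf, ih, evIdx]

theorem natdiv0 (a b : Nat) : (((a:Int))/((b:Int))).toNat = a/b := Nat.add_zero (a.div b)

theorem cntE (n : Nat) : (if 0 < n then (((n:Int) + 2 - 1) / 2).toNat else 0) = (n+1)/2 := by
  split_ifs with h
  · have h1 : ((n:Int) + 2 - 1) = ((n+1 : Nat) : Int) := by push_cast; ring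
    rw [h1, show (2:Int) = ((2:Nat):Int) from rfl, natdiv0]
  · have : n = 0 := by omega
    simp [this]

theorem slice?_even : ∀ xs : List Int, PySem.List.slice? xs none none 2 = some (evIdx xs) := by
  intro xs
  simp only [PySem.List.slice?, PySem.List.sliceIndices]
  norm_num
  have hfun : (fun x : Nat => xs[(2 * (x:Int)).toNat]?) = (fun k : Nat => xs[2*k]?) := by
    funext k
    have h2 : (2 * (k:Int)).toNat = 2*k := by omega
    rw [h2]
  rw [cntE, hfun, fm2 xs]

theorem slice?_odd : ∀ xs : List Int, PySem.List.slice? xs (some 1) none 2 = some (odIdx xs) := by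
  intro xs
  cases xs with
  | nil => decide
  | cons x t =>
    simp only [PySem.List.slice?, PySem.List.sliceIndices]
    norm_num
    have hfun : (fun k : Nat => (x::t)[(1 + 2 * (k:Int)).toNat]?) = (fun k : Nat => t[2*k]?) := by
      funext k
      have h2 : (1 + 2 * (k:Int)).toNat = 2*k+1 := by omega
      simp [h2]
    rw [cntE, hfun, fm2 t]
    rfl

-- the element(s) A's iteration k appends to offspring1, in Nat form
def emN (xs ys : List Int) (k : Nat) : List Int :=
  if k % 2 = 0 then (if k < xs.length then [xs.getD k 0] else [])
  else (if k < ys.length then [ys.getD k 0] else [])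

theorem if_lt_tail (l : List Int) (k : Nat) :
    (if k+1 < l.length then [l.getD (k+1) 0] else []) = (if k < l.tail.length then [l.tail.getD k 0] else []) := by
  cases l with
  | nil => simp
  | cons a u => simp

theorem emN_succ (xs ys : List Int) (k : Nat) : emN xs ys (k+1) = emN ys.tail xs.tail k := by
  unfold emN
  by_cases hk : k % 2 = 0
  · have h1 : ¬((k+1) % 2 = 0) := by omega
    rw [if_neg h1, if_pos hk]
    exact if_lt_tail ys k
  · have h1 : (k+1) % 2 = 0 := by omega
    rw [if_pos h1, if_neg hk]
    exact if_lt_tail xs k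

theorem evIdx_cons (x : Int) (t : List Int) : evIdx (x :: t) = x :: evIdx t.tail := by
  cases t with
  | nil => simp [evIdx]
  | cons y u => simp [evIdx]

theorem flatMap_emN_aux : ∀ (n : Nat) (xs ys : List Int), xs.length + ys.length ≤ n →
    (List.range (max xs.length ys.length)).flatMap (emN xs ys) = sMerge (evIdx xs) (odIdx ys) := by
  intro n
  induction n with
  | zero =>
    intro xs ys h
    have hx : xs = [] := by cases xs <;> simp_all
    have hy : ys = [] := by cases ys <;> simp_all
    subst hx; subst hy
    simp [sMerge, evIdx, odIdx]
  | succ n ih =>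
    intro xs ys h
    cases hm : max xs.length ys.length with
    | zero =>
      have hx : xs = [] := by cases xs <;> simp_all
      have hy : ys = [] := by cases ys <;> simp_all
      subst hx; subst hy
      simp [sMerge, evIdx, odIdx]
    | succ m =>
      have h1 : 1 ≤ xs.length ∨ 1 ≤ ys.length := by omega
      have htl : xs.tail.length + ys.tail.length ≤ n := by
        simp [List.length_tail]; omega
      have hm' : max ys.tail.length xs.tail.length = m := by
        simp [List.length_tail]; omega
      rw [List.range_succ_eq_map, List.flatMap_cons, List.flatMap_map]
      have hf : (fun a => emN xs ys a.succ) = emN ys.tail xs.tail := by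
        funext k; exact emN_succ xs ys k
      rw [hf]
      have hrec := ih ys.tail xs.tail (by omega)
      rw [hm'] at hrec
      rw [hrec]
      cases xs with
      | nil =>
        have hy : ys ≠ [] := by cases ys <;> simp_all
        simp [emN, odIdx, evIdx, sMerge, sMerge_nil_right]
      | cons x t =>
        have h0 : emN (x :: t) ys 0 = [x] := by simp [emN]
        rw [h0, evIdx_cons]
        simp [sMerge, odIdx]

theorem flatMap_emN (xs ys : List Int) :
    (List.range (max xs.length ys.length)).flatMap (emN xs ys) = sMerge (evIdx xs) (odIdx ys) :=
  flatMap_emN_aux (xs.length + ys.length) xs ys le_rfl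

theorem acStep_natCast (p1 p2 : List Int) (st : List Int × List Int) (k : Nat) :
    acStep p1 p2 st (k : Int) = (st.1 ++ emN p1 p2 k, st.2 ++ emN p2 p1 k) := by
  unfold acStep emN
  have hmod : ((k : Int) % 2) = ((k % 2 : Nat) : Int) := by push_cast; rfl
  by_cases hk : k % 2 = 0
  · simp [hmod, hk, PySem.List.pyGetD_natCast]
    constructor <;> split_ifs <;> simp_all
  · have hk1 : k % 2 = 1 := by omega
    simp [hmod, hk1, PySem.List.pyGetD_natCast]
    constructor <;> split_ifs <;> simp_all

theorem foldl_acStep (p1 p2 : List Int) : ∀ (l : List Nat) (acc : List Int × List Int),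
    l.foldl (fun (st : List Int × List Int) (k : Nat) => acStep p1 p2 st (k : Int)) acc
      = (acc.1 ++ l.flatMap (emN p1 p2), acc.2 ++ l.flatMap (emN p2 p1)) := by
  intro l
  induction l with
  | nil => simp
  | cons k t ih =>
    intro acc
    rw [List.foldl_cons, acStep_natCast, ih]
    simp

theorem ac_eq : ∀ parent1 parent2 : List Int,
    alternate_crossover parent1 parent2
      = (sMerge (evIdx parent1) (odIdx parent2), sMerge (evIdx parent2) (odIdx parent1)) := by
  intro p1 p2
  unfold alternate_crossover
  have hmax : max (p1.length : Int) (p2.length : Int) = ((max p1.length p2.length : Nat) : Int) := by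
    push_cast; rfl
  rw [hmax, PySem.List.pyRange_zero_natCast, List.foldl_map, foldl_acStep]
  simp only [List.nil_append]
  rw [flatMap_emN p1 p2, Nat.max_comm, flatMap_emN p2 p1]

-- ===== VERDICT (by name: the statement is the Claim_ definition above) =====
theorem alternate_crossover_spec : Claim_equal_alternate_crossover := by
  intro p1 p2 _
  unfold Spec_alternate_crossover alternate_crossover_alt
  rw [ac_eq, slice?_even, slice?_even, slice?_odd, slice?_odd]
  simp [acMerge_eq_sMerge]
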